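-- pv_equiv track=rewrite | github.com/MasterScott/IRIS | modules/social/discord/token_info.py | __get_badges
-- ===== SOURCE A (Python) =====
-- def __get_badges(flags: int) -> list[str]:
--     """ Get badges from flags """
--     BADGES = {
--         1 << 0:  'Discord Employee',
--         1 << 1:  'Partnered Server Owner',
--         1 << 2:  'HypeSquad Events',
--         1 << 3:  'Bug Hunter Level 1',
--         1 << 6:  'House Bravery',
--         1 << 7:  'House Brilliance',
--         1 << 8:  'House Balance',
--         1 << 9:  'Early Supporter',
--         1 << 10: 'Team User',
--         1 << 12: 'System',
--         1 << 14: 'Bug Hunter Level 2',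
--         1 << 16: 'Verified Bot',
--         1 << 17: 'Early Verified Bot Developer',
--         1 << 18: 'Discord Certified Moderator'
--     }
--
--     badges = []
--
--     for badge_flag, badge_name in BADGES.items():
--         if flags & badge_flag == badge_flag:
--             badges.append(badge_name)
--
--     return badges
-- ===== SOURCE B (Python) =====
-- def __get_badges(flags: int) -> list[str]:
--     """ Get badges from flags """
--     # positional table: NAMES[bit] is the badge living at that bit (None = no badge there)
--     NAMES = [
--         'Discord Employee',            # bit 0
--         'Partnered Server Owner',      # bit 1
--         'HypeSquad Events',            # bit 2
--         'Bug Hunter Level 1',          # bit 3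
--         None,                          # bit 4
--         None,                          # bit 5
--         'House Bravery',               # bit 6
--         'House Brilliance',            # bit 7
--         'House Balance',               # bit 8
--         'Early Supporter',             # bit 9
--         'Team User',                   # bit 10
--         None,                          # bit 11
--         'System',                      # bit 12
--         None,                          # bit 13
--         'Bug Hunter Level 2',          # bit 14
--         None,                          # bit 15
--         'Verified Bot',                # bit 16
--         'Early Verified Bot Developer',    # bit 17
--         'Discord Certified Moderator',     # bit 18
--     ]
--     return [name for bit, name in enumerate(NAMES) if name is not None and flags >> bit & 1]
-- ===== Notes on version B (the rewrite author's own statement) =====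
-- stated objective: idiomatic
-- what changed: Replaces A's scan of a flag-keyed dict with a mask-and-compare test per entry by a positional table (list indexed by bit number, None for unused bits) read with enumerate in a single comprehension that tests each bit by shifting (flags >> bit & 1).
import Mathlib
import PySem

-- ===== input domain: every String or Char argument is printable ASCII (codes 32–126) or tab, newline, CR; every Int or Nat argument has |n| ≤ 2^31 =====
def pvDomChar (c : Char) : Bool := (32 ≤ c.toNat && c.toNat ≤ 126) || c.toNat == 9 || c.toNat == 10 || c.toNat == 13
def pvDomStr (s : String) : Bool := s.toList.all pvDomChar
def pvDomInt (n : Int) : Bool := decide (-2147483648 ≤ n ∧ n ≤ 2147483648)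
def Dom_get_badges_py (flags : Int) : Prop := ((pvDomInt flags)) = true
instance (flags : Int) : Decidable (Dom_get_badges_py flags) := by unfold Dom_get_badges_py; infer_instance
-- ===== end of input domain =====

-- B replaces A's scan of a flag-keyed dict (mask-equality test per entry) by a positional table
-- indexed by bit number, read with enumerate in a comprehension and a shift-and-test of each bit
-- (flags >> bit & 1) — a different data structure and a different bit test, same cost.

-- ===== PORT A =====
-- the BADGES dict literal of A, in insertion order (its items)
def pvBadgesA : List (Int × String) :=
  [((1:Int) <<< 0, "Discord Employee"), ((1:Int) <<< 1, "Partnered Server Owner"),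
   ((1:Int) <<< 2, "HypeSquad Events"), ((1:Int) <<< 3, "Bug Hunter Level 1"),
   ((1:Int) <<< 6, "House Bravery"), ((1:Int) <<< 7, "House Brilliance"),
   ((1:Int) <<< 8, "House Balance"), ((1:Int) <<< 9, "Early Supporter"),
   ((1:Int) <<< 10, "Team User"), ((1:Int) <<< 12, "System"),
   ((1:Int) <<< 14, "Bug Hunter Level 2"), ((1:Int) <<< 16, "Verified Bot"),
   ((1:Int) <<< 17, "Early Verified Bot Developer"), ((1:Int) <<< 18, "Discord Certified Moderator")]

-- for badge_flag, badge_name in BADGES.items(): if flags & badge_flag == badge_flag: badges.append(badge_name)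
def get_badges_py (flags : Int) : List String :=
  pvBadgesA.foldl
    (fun badges p => if PySem.Int.band flags p.1 == p.1 then badges ++ [p.2] else badges) []

-- ===== PORT B =====
-- B's positional NAMES table: entry at index j is the badge at bit j, none where no badge lives
def pvNames : List (Option String) :=
  [some "Discord Employee", some "Partnered Server Owner",
   some "HypeSquad Events", some "Bug Hunter Level 1",
   none, none,
   some "House Bravery", some "House Brilliance",
   some "House Balance", some "Early Supporter",
   some "Team User", none,
   some "System", none,
   some "Bug Hunter Level 2", none,
   some "Verified Bot", some "Early Verified Bot Developer",
   some "Discord Certified Moderator"]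

-- [name for bit, name in enumerate(NAMES) if name is not None and flags >> bit & 1]
-- (the enumerate index is a nonnegative Int; .toNat is exact)
def get_badges_py_alt (flags : Int) : List String :=
  (PySem.List.enumerate pvNames).filterMap (fun p =>
    match p.2 with
    | some name => if PySem.Int.band (flags >>> p.1.toNat) 1 ≠ 0 then some name else none
    | none => none)

-- ===== PRECONDITION & SPEC =====
def Spec_get_badges_py (flags : Int) (out : List String) : Prop := out = get_badges_py_alt flags
instance (flags : Int) (out : List String) : Decidable (Spec_get_badges_py flags out) := by unfold Spec_get_badges_py; infer_instance

-- ===== CLAIM (what is proved, stated in full; the proofs are below) =====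
def Claim_equal_get_badges_py : Prop := ∀ (flags : Int), Dom_get_badges_py flags → Spec_get_badges_py flags (get_badges_py flags)

-- ===== LEMMAS AND PROOFS =====

-- Nat.testBit as a div/mod test
lemma pvTB (m j : Nat) : m.testBit j = ((m / 2 ^ j) % 2 == 1) := by
  simp [Nat.testBit, Nat.shiftRight_eq_div_pow]

-- A's test of entry 2^j (mask and compare with the key) coincides with B's test of bit j
-- (shift down and test the low bit), on every Int, both signs
lemma pvBit (flags : Int) (j : Nat) :
    PySem.Int.band flags ((1:Int) <<< j) = (1:Int) <<< j ↔ PySem.Int.band (flags >>> j) 1 ≠ 0 := by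
  have hpow : (0:Nat) < 2 ^ j := Nat.two_pow_pos j
  cases flags with
  | ofNat m =>
      rw [show ((1:Int) <<< j) = ((1 <<< j : Nat) : Int) from rfl,
          show ((Int.ofNat m) >>> j) = ((m >>> j : Nat) : Int) from rfl,
          show (Int.ofNat m) = ((m:Nat):Int) from rfl,
          show (1:Int) = ((1:Nat):Int) from rfl,
          PySem.Int.band_natCast, PySem.Int.band_natCast,
          Nat.cast_inj, show ((0:Int)) = ((0:Nat):Int) from rfl, Ne, Nat.cast_inj,
          Nat.shiftRight_eq_div_pow, Nat.one_shiftLeft, Nat.and_two_pow, Nat.and_one_is_mod]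
      have h := pvTB m j
      cases hb : m.testBit j <;> rw [hb] at h <;> simp at h <;> simp <;> omega
  | negSucc m =>
      have h1 : PySem.Int.band (Int.negSucc m) ((1:Int) <<< j)
          = (((1 <<< j : Nat) - ((1 <<< j : Nat) &&& m) : Nat) : Int) := by
        rw [show ((1:Int) <<< j) = ((1 <<< j : Nat) : Int) from rfl]
        simp [PySem.Int.band, Int.negSucc_not_nonneg]
        rfl
      have h2 : PySem.Int.band ((Int.negSucc m) >>> j) 1
          = ((1 - (1 &&& (m >>> j)) : Nat) : Int) := by
        rw [show ((Int.negSucc m) >>> j) = Int.negSucc (m >>> j) from rfl]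
        simp [PySem.Int.band, Int.negSucc_not_nonneg]
        rfl
      rw [h1, h2, show ((1:Int) <<< j) = ((1 <<< j : Nat) : Int) from rfl,
          Nat.cast_inj, show ((0:Int)) = ((0:Nat):Int) from rfl, Ne, Nat.cast_inj,
          Nat.one_shiftLeft, Nat.and_comm, Nat.shiftRight_eq_div_pow,
          Nat.and_two_pow, Nat.and_comm, Nat.and_one_is_mod]
      have h := pvTB m j
      cases hb : m.testBit j <;> rw [hb] at h <;> simp at h <;> simp <;> omega

-- one chunk of A's chain rewritten into the matching chunk of B's chain
lemma pvChunk (flags : Int) (j : Nat) (n : String) :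
    (if PySem.Int.band flags ((1:Int) <<< j) = (1:Int) <<< j then [n] else ([] : List String))
      = (if PySem.Int.band (flags >>> j) 1 = 0 then [] else [n]) := by
  simp [pvBit flags j, ite_not]

-- filterMap as a flatMap of per-element chunks
lemma pvFilterMapFlat {α β : Type} (f : α → Option β) (l : List α) :
    l.filterMap f = l.flatMap (fun x => (f x).toList) := by
  induction l with
  | nil => rfl
  | cons a l ih => cases h : f a <;> simp [h, ih]

-- (l.filter p).map f as a flatMap of per-element chunks
lemma pvFilterMapChunks {α β : Type} (l : List α) (p : α → Bool) (f : α → β) :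
    (l.filter p).map f = l.flatMap (fun x => if p x then [f x] else []) := by
  induction l with
  | nil => rfl
  | cons a l ih => by_cases h : p a <;> simp [h, ih]

-- bit-0 chunk: flags >>> 0 is flags itself, so A's test 'band flags 1 = 1' flips into B's 'band flags 1 = 0'
lemma pvChunk0 (flags : Int) (n : String) :
    (if PySem.Int.band flags 1 = 1 then [n] else ([] : List String))
      = (if PySem.Int.band flags 1 = 0 then [] else [n]) := by
  have h := pvBit flags 0
  rw [show ((1:Int) <<< (0:Nat)) = 1 from rfl, Int.shiftRight_zero] at h
  simp [h, ite_not]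

-- ===== VERDICT (by name: the statement is the Claim_ definition above) =====
theorem get_badges_py_spec : Claim_equal_get_badges_py := by
  intro flags _
  unfold Spec_get_badges_py
  rw [get_badges_py, PySem.List.foldl_append_if, List.nil_append, pvFilterMapChunks]
  rw [get_badges_py_alt, pvFilterMapFlat]
  simp only [pvBadgesA, pvNames, PySem.List.enumerate_cons, PySem.List.enumerate_nil,
    List.flatMap_cons, List.flatMap_nil]
  norm_num [apply_ite Option.toList]
  simp only [show ((1:Int) <<< (0:Int)) = ((1:Int) <<< (0:Nat)) from by decide,
    show ((1:Int) <<< (1:Int)) = ((1:Int) <<< (1:Nat)) from by decide,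
    show ((1:Int) <<< (2:Int)) = ((1:Int) <<< (2:Nat)) from by decide,
    show ((1:Int) <<< (3:Int)) = ((1:Int) <<< (3:Nat)) from by decide,
    show ((1:Int) <<< (6:Int)) = ((1:Int) <<< (6:Nat)) from by decide,
    show ((1:Int) <<< (7:Int)) = ((1:Int) <<< (7:Nat)) from by decide,
    show ((1:Int) <<< (8:Int)) = ((1:Int) <<< (8:Nat)) from by decide,
    show ((1:Int) <<< (9:Int)) = ((1:Int) <<< (9:Nat)) from by decide,
    show ((1:Int) <<< (10:Int)) = ((1:Int) <<< (10:Nat)) from by decide,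
    show ((1:Int) <<< (12:Int)) = ((1:Int) <<< (12:Nat)) from by decide,
    show ((1:Int) <<< (14:Int)) = ((1:Int) <<< (14:Nat)) from by decide,
    show ((1:Int) <<< (16:Int)) = ((1:Int) <<< (16:Nat)) from by decide,
    show ((1:Int) <<< (17:Int)) = ((1:Int) <<< (17:Nat)) from by decide,
    show ((1:Int) <<< (18:Int)) = ((1:Int) <<< (18:Nat)) from by decide]
  simp [pvChunk, pvChunk0]
  rfl
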